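-- pv_equiv track=rewrite | github.com/wattaihei/ProgrammingContest | Codeforces/ECR78/probB.py | solveodd
-- ===== SOURCE A (Python) =====
-- def solveodd(border):
--     l = -1
--     r = 10**5
--     while r-l > 1:
--         m = (r+l)//2
--         num = m*2 if m%2 == 1 else m*2+1
--         if num*(num+1)//2 >= border:
--             r = m
--         else:
--             l = m
--     return r*2 if r%2==1 else r*2+1
-- ===== SOURCE B (Python) =====
-- def solveodd(border):
--     # Linear scan over the value ascending sequence (numbers
--     # congruent to one or two modulo four): return the first whose triangular number
--     # reaches border.
--     num = 1
--     while num * (num + 1) // 2 < border: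
--         num += 1 if num % 4 == 1 else 3
--     return num
-- ===== Notes on version B (the rewrite author's own statement) =====
-- stated objective: simpler
-- what changed: Replaced the index binary search (with the m -> 2m/2m+1 encoding and final decode) by a direct linear scan over the value ascending sequence of integers congruent to one or two modulo four returning the first whose triangular number reaches border.
import Mathlib
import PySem

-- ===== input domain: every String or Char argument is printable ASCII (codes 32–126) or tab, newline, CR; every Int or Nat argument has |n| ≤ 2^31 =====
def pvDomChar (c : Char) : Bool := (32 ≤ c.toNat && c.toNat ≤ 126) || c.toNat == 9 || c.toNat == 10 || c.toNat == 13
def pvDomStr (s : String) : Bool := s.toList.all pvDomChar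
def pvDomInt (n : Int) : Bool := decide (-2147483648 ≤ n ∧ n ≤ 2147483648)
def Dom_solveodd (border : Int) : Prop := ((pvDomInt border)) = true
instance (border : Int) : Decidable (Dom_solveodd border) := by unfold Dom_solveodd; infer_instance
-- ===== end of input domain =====

-- B replaces A's index binary search by a direct linear scan of the value
-- ascending sequence of integers congruent to one or two modulo four (simpler decomposition; not faster).

-- ===== PORT A =====
-- the while-loop of A: state (l, r), returns the final r
def pvBsLoop (border l r : Int) : Int :=
  if r - l > 1 then
    let m := PySem.Int.floordiv (r + l) 2
    let num := if PySem.Int.mod m 2 = 1 then m * 2 else m * 2 + 1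
    if PySem.Int.floordiv (num * (num + 1)) 2 ≥ border then
      pvBsLoop border l m
    else
      pvBsLoop border m r
  else r
termination_by (r - l).toNat
decreasing_by
  · have h1 : l + 1 ≤ PySem.Int.floordiv (r + l) 2 := by
      rw [PySem.Int.le_floordiv_iff_mul_le (by omega : (0:Int) < 2)]; omega
    have h2 : PySem.Int.floordiv (r + l) 2 < r := by
      rw [PySem.Int.floordiv_lt_iff_lt_mul (by omega : (0:Int) < 2)]; omega
    omega
  · have h1 : l + 1 ≤ PySem.Int.floordiv (r + l) 2 := by
      rw [PySem.Int.le_floordiv_iff_mul_le (by omega : (0:Int) < 2)]; omega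
    have h2 : PySem.Int.floordiv (r + l) 2 < r := by
      rw [PySem.Int.floordiv_lt_iff_lt_mul (by omega : (0:Int) < 2)]; omega
    omega

def solveodd (border : Int) : Int :=
  let r := pvBsLoop border (-1) (10 ^ 5)
  if PySem.Int.mod r 2 = 1 then r * 2 else r * 2 + 1

-- ===== PORT B =====
-- the while-loop of B: scan the sequence of integers congruent to one or two modulo four from num upward
def pvScan (border num : Int) : Int :=
  if PySem.Int.floordiv (num * (num + 1)) 2 < border then
    pvScan border (num + if PySem.Int.mod num 4 = 1 then 1 else 3)
  else num
termination_by (border - num).toNat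
decreasing_by
  have hx : num ≤ PySem.Int.floordiv (num * (num + 1)) 2 := by
    rw [PySem.Int.le_floordiv_iff_mul_le (by omega : (0:Int) < 2)]
    nlinarith [mul_self_nonneg num, mul_self_nonneg (num - 1)]
  split <;> omega

def solveodd_alt (border : Int) : Int := pvScan border 1

-- ===== PRECONDITION & SPEC =====
def Spec_solveodd (border : Int) (out : Int) : Prop := out = solveodd_alt border
instance (border : Int) (out : Int) : Decidable (Spec_solveodd border out) := by unfold Spec_solveodd; infer_instance

-- ===== CLAIM (what is proved, stated in full; the proofs are below) =====
def Claim_equal_solveodd : Prop := ∀ (border : Int), Dom_solveodd border → Spec_solveodd border (solveodd border)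

-- ===== LEMMAS AND PROOFS =====

-- proof-side vocabulary
def pvTri (x : Int) : Int := x * (x + 1) / 2
def pvS (x : Int) : Prop := x % 4 = 1 ∨ x % 4 = 2
def pvPrev (x : Int) : Int := if x % 4 = 2 then x - 1 else x - 3
def pvNumOf (m : Int) : Int := if m % 2 = 1 then m * 2 else m * 2 + 1
def pvP (border m : Int) : Prop := border ≤ pvTri (pvNumOf m)

lemma pvTri_mono {a b : Int} (h0 : 0 ≤ a) (hab : a ≤ b) : pvTri a ≤ pvTri b := by
  unfold pvTri
  exact Int.ediv_le_ediv (by omega) (by nlinarith)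

lemma floordiv_tri (x : Int) : PySem.Int.floordiv (x * (x + 1)) 2 = pvTri x := by
  rw [PySem.Int.floordiv_eq_ediv_of_pos (by omega : (0:Int) < 2)]; rfl


-- invariant of A's binary search: on exit r is the least index whose sequence
-- value's triangular number reaches border
lemma pvBsLoop_spec (border : Int) : ∀ (n : Nat) (l r : Int), (r - l).toNat ≤ n → l < r →
    (l = -1 ∨ (0 ≤ l ∧ ¬ pvP border l)) → pvP border r →
    0 ≤ pvBsLoop border l r ∧ pvP border (pvBsLoop border l r) ∧
      (pvBsLoop border l r = 0 ∨ ¬ pvP border (pvBsLoop border l r - 1)) := by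
  intro n
  induction n with
  | zero => intro l r hn hlt _ _; omega
  | succ n ih =>
    intro l r hn hlt hl hr
    rw [pvBsLoop]
    by_cases hgt : r - l > 1
    · rw [if_pos hgt]
      simp only []
      set m := PySem.Int.floordiv (r + l) 2 with hmdef
      have hm1 : l + 1 ≤ m := by
        rw [hmdef, PySem.Int.le_floordiv_iff_mul_le (by omega : (0:Int) < 2)]; omega
      have hm2 : m < r := by
        rw [hmdef, PySem.Int.floordiv_lt_iff_lt_mul (by omega : (0:Int) < 2)]; omega
      have hnum : (if PySem.Int.mod m 2 = 1 then m * 2 else m * 2 + 1) = pvNumOf m := by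
        unfold pvNumOf; rw [PySem.Int.mod_eq_emod_of_pos (by omega : (0:Int) < 2)]
      rw [hnum]
      by_cases hge : PySem.Int.floordiv (pvNumOf m * (pvNumOf m + 1)) 2 ≥ border
      · rw [if_pos hge]
        have hPm : pvP border m := by unfold pvP; rw [← floordiv_tri]; exact hge
        exact ih l m (by omega) (by omega) hl hPm
      · rw [if_neg hge]
        have hPm : ¬ pvP border m := by unfold pvP; rw [← floordiv_tri]; exact hge
        exact ih m r (by omega) (by omega) (Or.inr ⟨by omega, hPm⟩) hr
    · rw [if_neg hgt]
      refine ⟨by omega, hr, ?_⟩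
      have hrl : r = l + 1 := by omega
      rcases hl with h | h
      · left; omega
      · right; rw [hrl]; simpa using h.2

-- invariant of B's scan: the result is in the sequence, reaches border, and is
-- either the starting point or has a failing predecessor
lemma pvTri_ge_self (num : Int) : num ≤ pvTri num := by
  unfold pvTri
  have h2 : num * 2 ≤ num * (num + 1) := by nlinarith [mul_self_nonneg num, mul_self_nonneg (num - 1)]
  have h3 := Int.le_ediv_iff_mul_le (show (0:Int) < 2 by omega) (a := num * (num + 1)) (b := num)
  omega

lemma pvScan_spec (border : Int) : ∀ (n : Nat) (num : Int), (border - num).toNat ≤ n → 1 ≤ num → pvS num →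
    1 ≤ pvScan border num ∧ pvS (pvScan border num) ∧ border ≤ pvTri (pvScan border num) ∧
      (pvScan border num = num ∨ pvTri (pvPrev (pvScan border num)) < border) := by
  intro n
  induction n with
  | zero =>
    intro num hn h1 hS
    have hstop : ¬ PySem.Int.floordiv (num * (num + 1)) 2 < border := by
      rw [floordiv_tri]
      have := pvTri_ge_self num
      omega
    rw [pvScan, if_neg hstop]
    rw [floordiv_tri] at hstop
    exact ⟨h1, hS, by omega, Or.inl rfl⟩
  | succ n ih =>
    intro num hn h1 hS
    rw [pvScan]
    by_cases hlt : PySem.Int.floordiv (num * (num + 1)) 2 < border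
    · rw [if_pos hlt]
      have hmod : PySem.Int.mod num 4 = num % 4 := PySem.Int.mod_eq_emod_of_pos (by omega)
      have hstep : (num + if PySem.Int.mod num 4 = 1 then 1 else 3) =
          (if num % 4 = 1 then num + 1 else num + 3) := by
        rw [hmod]; split <;> simp_all
      set num' := num + if PySem.Int.mod num 4 = 1 then 1 else 3 with hnum'
      have h1' : 1 ≤ num' := by rw [hstep]; split <;> omega
      have hS' : pvS num' := by
        unfold pvS at hS ⊢; rw [hstep]
        rcases hS with h | h <;> simp [h] <;> omega
      have hlt' : num < border := by
        rw [floordiv_tri] at hlt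
        have := pvTri_ge_self num
        omega
      have hn' : (border - num').toNat ≤ n := by
        have : num + 1 ≤ num' := by rw [hstep]; split <;> omega
        omega
      obtain ⟨w1, wS, wB, wP⟩ := ih num' hn' h1' hS'
      refine ⟨w1, wS, wB, ?_⟩
      rcases wP with h | h
      · right
        have hprev : pvPrev num' = num := by
          unfold pvPrev; rw [hstep]
          unfold pvS at hS; rcases hS with hs | hs <;> simp [hs] <;> omega
        rw [h, hprev]
        rw [floordiv_tri] at hlt; omega
      · right; exact h
    · rw [if_neg hlt]
      rw [floordiv_tri] at hlt
      exact ⟨h1, hS, by omega, Or.inl rfl⟩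

-- the "first element of the sequence whose triangular number reaches border" is unique
lemma pvFirst_unique (border x y : Int) (hx1 : 1 ≤ x) (hy1 : 1 ≤ y)
    (hSx : pvS x) (hSy : pvS y)
    (hx : border ≤ pvTri x) (hy : border ≤ pvTri y)
    (hxp : x = 1 ∨ pvTri (pvPrev x) < border)
    (hyp : y = 1 ∨ pvTri (pvPrev y) < border) : x = y := by
  rcases lt_trichotomy x y with h | h | h
  · exfalso
    rcases hyp with h2 | h2
    · omega
    · have hle : x ≤ pvPrev y := by
        unfold pvPrev
        unfold pvS at hSx hSy
        rcases hSy with hs | hs <;> simp [hs] <;> omega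
      have := pvTri_mono (by omega : (0:Int) ≤ x) hle
      omega
  · exact h
  · exfalso
    rcases hxp with h2 | h2
    · omega
    · have hle : y ≤ pvPrev x := by
        unfold pvPrev
        unfold pvS at hSx hSy
        rcases hSx with hs | hs <;> simp [hs] <;> omega
      have := pvTri_mono (by omega : (0:Int) ≤ y) hle
      omega

-- ===== VERDICT (by name: the statement is the Claim_ definition above) =====
theorem solveodd_spec : Claim_equal_solveodd := by
  unfold Claim_equal_solveodd
  intro border hdom
  unfold Spec_solveodd solveodd solveodd_alt
  have hdom' : border ≤ 2147483648 := by
    unfold Dom_solveodd pvDomInt at hdom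
    simpa using (of_decide_eq_true hdom).2
  have htop : pvP border (10 ^ 5) := by
    unfold pvP pvNumOf pvTri
    norm_num
    omega
  obtain ⟨hr0, hrP, hrPrev⟩ := pvBsLoop_spec border 100001 (-1) (10 ^ 5) (by norm_num) (by omega) (Or.inl rfl) htop
  set r := pvBsLoop border (-1) (10 ^ 5) with hr
  -- the value A returns
  have hval : (if PySem.Int.mod r 2 = 1 then r * 2 else r * 2 + 1) = pvNumOf r := by
    unfold pvNumOf; rw [PySem.Int.mod_eq_emod_of_pos (by omega : (0:Int) < 2)]
  rw [hval]
  -- A's value has the "first element" properties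
  have hv1 : 1 ≤ pvNumOf r := by unfold pvNumOf; split <;> omega
  have hvS : pvS (pvNumOf r) := by
    unfold pvNumOf pvS; split <;> omega
  have hvB : border ≤ pvTri (pvNumOf r) := hrP
  have hvP : pvNumOf r = 1 ∨ pvTri (pvPrev (pvNumOf r)) < border := by
    rcases hrPrev with h | h
    · left; rw [h]; unfold pvNumOf; norm_num
    · right
      have hprev : pvPrev (pvNumOf r) = pvNumOf (r - 1) := by
        unfold pvPrev pvNumOf; split_ifs <;> omega
      rw [hprev]
      unfold pvP at h; omega
  -- B's value has them too
  obtain ⟨w1, wS, wB, wP⟩ := pvScan_spec border (border - 1).toNat 1 (by omega) (by omega) (by unfold pvS; omega)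
  exact pvFirst_unique border (pvNumOf r) (pvScan border 1) hv1 w1 hvS wS hvB wB hvP wP
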